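-- pv_equiv track=rewrite | github.com/rhosocial/python-activerecord | src/rhosocial/activerecord/interface/model.py | replace_question_marks
-- ===== SOURCE A (Python) =====
-- def replace_question_marks(sql: str, placeholder: str) -> str:
--     """Replace question mark placeholders with database-specific placeholders.
--
--     This utility function carefully replaces question marks that are used as parameter
--     placeholders, while preserving question marks that might appear in string literals.
--
--     Args:
--         sql: Original SQL with question mark placeholders
--         placeholder: Database-specific placeholder to use
--
--     Returns:
--         SQL with replaced placeholders
--     """
--     # Check if we need indexed placeholders (e.g., $1, $2, $3 for PostgreSQL)
--     if placeholder.find('%d') != -1: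
--         # For indexed placeholders
--         parts = []
--         param_index = 1
--         i = 0
--         while i < len(sql):
--             if sql[i] == '?':
--                 # Replace with indexed placeholder
--                 parts.append(placeholder % param_index)
--                 param_index += 1
--             else:
--                 parts.append(sql[i])
--             i += 1
--         return ''.join(parts)
--     else:
--         # For non-indexed placeholders
--         return sql.replace('?', placeholder)
-- ===== SOURCE B (Python) =====
-- def replace_question_marks(sql: str, placeholder: str) -> str:
--     """Replace '?' placeholders; split-then-interleave instead of a per-character scan."""
--     if '%d' in placeholder:
--         parts = sql.split('?')
--         out = [parts[0]]
--         for k in range(1, len(parts)):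
--             out.append(placeholder % k)
--             out.append(parts[k])
--         return ''.join(out)
--     return sql.replace('?', placeholder)
-- ===== Notes on version B (the rewrite author's own statement) =====
-- stated objective: alternative
-- what changed: The per-character while loop over sql (appending a char or an indexed placeholder per step) is replaced by sql.split('?') followed by interleaving placeholder % k into the gaps; the non-indexed branch stays sql.replace.
-- outside the precondition, e.g. on replace_question_marks('a?b', '%%d%s'): A returns 'a%d1b', B returns 'a%d1b'
import Mathlib
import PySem

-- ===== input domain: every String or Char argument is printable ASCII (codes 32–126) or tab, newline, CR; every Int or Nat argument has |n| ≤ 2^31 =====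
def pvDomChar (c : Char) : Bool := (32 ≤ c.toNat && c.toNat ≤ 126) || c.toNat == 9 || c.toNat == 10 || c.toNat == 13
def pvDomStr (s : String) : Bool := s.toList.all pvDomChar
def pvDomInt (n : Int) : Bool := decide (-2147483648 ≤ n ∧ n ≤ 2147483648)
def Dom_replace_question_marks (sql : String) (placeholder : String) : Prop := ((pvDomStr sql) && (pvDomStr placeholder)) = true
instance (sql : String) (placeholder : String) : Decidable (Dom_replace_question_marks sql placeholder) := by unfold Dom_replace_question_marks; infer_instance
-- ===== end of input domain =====

-- B replaces A's per-character scan with split-on-'?' then interleaving indexed placeholders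
-- into the gaps (objective: alternative decomposition; return values proved equal on Pre_).


-- shared hand port of Python's `placeholder % k`, exact on the formats Pre_ admits:
-- left to right, '%d' becomes str(k), '%%' becomes '%', everything else is literal
def fmtD (k : Int) : List Char → List Char
  | '%' :: 'd' :: rest => PySem.Int.toChars k ++ fmtD k rest
  | '%' :: '%' :: rest => '%' :: fmtD k rest
  | c :: rest => c :: fmtD k rest
  | [] => []

-- ===== PORT A =====
-- the while loop over sql: one step per character, appending to the `parts` list
def rqLoopA (ph : List Char) : List Char → Int → List (List Char) → List (List Char)
  | [], _, parts => parts
  | c :: rest, paramIndex, parts =>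
    if c = '?' then rqLoopA ph rest (paramIndex + 1) (parts ++ [fmtD paramIndex ph])
    else rqLoopA ph rest paramIndex (parts ++ [[c]])

def replace_question_marks (sql : String) (placeholder : String) : String :=
  if PySem.Str.find placeholder "%d" ≠ -1 then
    String.ofList (PySem.Chars.join [] (rqLoopA placeholder.toList sql.toList 1 []))
  else
    PySem.Str.replace sql "?" placeholder

-- ===== PORT B =====
-- the for-loop over range(1, len(parts)): appends placeholder % k then parts[k]
def rqBuildB (ph : List Char) : List (List Char) → Int → List (List Char)
  | [], _ => []
  | p :: rest, k => fmtD k ph :: p :: rqBuildB ph rest (k + 1)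

def replace_question_marks_alt (sql : String) (placeholder : String) : String :=
  if PySem.Str.isIn "%d" placeholder then
    match PySem.Chars.splitOn sql.toList ['?'] with
    | [] => ""  -- unreachable: split always yields at least one part
    | p0 :: rest => String.ofList (PySem.Chars.join [] (p0 :: rqBuildB placeholder.toList rest 1))
  else
    PySem.Str.replace sql "?" placeholder

-- ===== PRECONDITION & SPEC =====
-- Pre_ excludes indexed-branch inputs (placeholder contains '%d', sql contains '?') whose
-- placeholder is not literal text plus '%%' escapes plus exactly ONE '%d' conversion
-- (stated in closed form: splitting on '%%', every '%' left begins '%d' and there is one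
-- such '%d' in total): with zero or several int conversions Python's %-formatting raises
-- (TypeError: not enough / not all arguments), and with any other conversion character it
-- raises (ValueError/TypeError) except for exotic escapes like '%%d%s', where the '%d'
-- substring is only an artifact of a '%%' escape and another conversion fires — there A
-- and B (which uses the same % operator) both return the same value, outside the ported
-- '%d'/'%%' formatting fragment.
def Pre_replace_question_marks (sql : String) (placeholder : String) : Prop :=
  (PySem.Str.isIn "%d" placeholder = true ∧ PySem.Str.isIn "?" sql = true) →
    ((∀ p ∈ PySem.Chars.splitOn placeholder.toList ['%', '%'],
        PySem.Chars.count p ['%'] = PySem.Chars.count p ['%', 'd']) ∧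
     ((PySem.Chars.splitOn placeholder.toList ['%', '%']).map
        (fun p => PySem.Chars.count p ['%', 'd'])).sum = 1)
instance (sql : String) (placeholder : String) : Decidable (Pre_replace_question_marks sql placeholder) := by
  unfold Pre_replace_question_marks; infer_instance

def pvWitness_replace_question_marks : String × String :=
  ("SELECT * FROM t WHERE a = ? AND pct = '5%%' AND b = ?", "$%d")

def Spec_replace_question_marks (sql : String) (placeholder : String) (out : String) : Prop := out = replace_question_marks_alt sql placeholder
instance (sql : String) (placeholder : String) (out : String) : Decidable (Spec_replace_question_marks sql placeholder out) := by unfold Spec_replace_question_marks; infer_instance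

-- ===== CLAIM (what is proved, stated in full; the proofs are below) =====
def Claim_equal_replace_question_marks : Prop := ∀ (sql : String) (placeholder : String), Dom_replace_question_marks sql placeholder → Pre_replace_question_marks sql placeholder → Spec_replace_question_marks sql placeholder (replace_question_marks sql placeholder)

-- ===== LEMMAS AND PROOFS =====

-- clean structural recursion equal to PySem.Chars.splitOn · ['?']
def splitQ : List Char → List (List Char)
  | [] => [[]]
  | c :: cs => if c = '?' then [] :: splitQ cs
               else match splitQ cs with
                    | [] => [[c]]
                    | p :: ps => (c :: p) :: ps

theorem splitQ_ne_nil (cs : List Char) : splitQ cs ≠ [] := by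
  cases cs with
  | nil => simp [splitQ]
  | cons c cs =>
    simp only [splitQ]
    split_ifs
    · simp
    · cases h : splitQ cs <;> simp

theorem intercalate_nil_left (l : List (List Char)) :
    ([] : List Char).intercalate l = l.flatten := by
  induction l with
  | nil => simp [List.intercalate]
  | cons a t ih =>
    cases t with
    | nil => simp [List.intercalate]
    | cons b t2 =>
      simp only [List.intercalate, List.intersperse] at *
      simp_all

-- characterisation of the fuelled PySem.Chars.splitOn.go for separator ['?']
theorem go_eq_splitQ (l : List Char) (cur : List Char) (acc : List (List Char))
    (fuel : Nat) (h : l.length < fuel) :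
    PySem.Chars.splitOn.go ['?'] fuel l cur acc =
      acc.reverse ++ (match splitQ l with
                      | [] => [cur.reverse]
                      | p :: ps => (cur.reverse ++ p) :: ps) := by
  induction fuel generalizing l cur acc with
  | zero => omega
  | succ fuel ih =>
    cases l with
    | nil => simp [PySem.Chars.splitOn.go, splitQ]
    | cons c rest =>
      by_cases hc : c = '?'
      · subst hc
        have hp : List.isPrefixOf ['?'] ('?' :: rest) = true := by
          simp [List.isPrefixOf]
        rw [PySem.Chars.splitOn.go]
        simp only [hp, if_true, List.length_singleton, List.drop_succ_cons, List.drop_zero]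
        rw [ih rest [] (cur.reverse :: acc) (by simp at h ⊢; omega)]
        rcases hs : splitQ rest with _ | ⟨p, ps⟩
        · exact absurd hs (splitQ_ne_nil rest)
        · simp [splitQ, hs]
      · have hp : List.isPrefixOf ['?'] (c :: rest) = false := by
          simp only [List.isPrefixOf, Bool.and_eq_false_iff, beq_eq_false_iff_ne, ne_eq]
          exact Or.inl fun h => hc h.symm
        rw [PySem.Chars.splitOn.go]
        simp only [hp, Bool.false_eq_true, if_false]
        rw [ih rest (c :: cur) acc (by simp at h ⊢; omega)]
        rcases hs : splitQ rest with _ | ⟨p, ps⟩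
        · exact absurd hs (splitQ_ne_nil rest)
        · simp [splitQ, hc, hs]

theorem splitOn_eq_splitQ (cs : List Char) :
    PySem.Chars.splitOn cs ['?'] = splitQ cs := by
  rw [PySem.Chars.splitOn, go_eq_splitQ cs [] [] (cs.length + 1) (by omega)]
  rcases hs : splitQ cs with _ | ⟨p, ps⟩
  · exact absurd hs (splitQ_ne_nil cs)
  · simp

-- A's loop with its accumulator pulled out
theorem rqLoopA_append (ph : List Char) (cs : List Char) (k : Int)
    (parts : List (List Char)) :
    rqLoopA ph cs k parts = parts ++ rqLoopA ph cs k [] := by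
  induction cs generalizing k parts with
  | nil => simp [rqLoopA]
  | cons c rest ih =>
    simp only [rqLoopA, List.nil_append]
    split_ifs
    · rw [ih (k + 1) (parts ++ [fmtD k ph]), ih (k + 1) [fmtD k ph]]; simp
    · rw [ih k (parts ++ [[c]]), ih k [[c]]]; simp

-- the heart: character scan = split-then-interleave, for every starting index
theorem scan_eq_interleave (ph : List Char) (cs : List Char) (k : Int) :
    (rqLoopA ph cs k []).flatten =
      (match splitQ cs with
       | [] => []
       | p :: ps => p ++ (rqBuildB ph ps k).flatten) := by
  induction cs generalizing k with
  | nil => simp [rqLoopA, splitQ, rqBuildB]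
  | cons c rest ih =>
    by_cases hc : c = '?'
    · subst hc
      simp only [rqLoopA]
      rw [rqLoopA_append]
      rcases hs : splitQ rest with _ | ⟨p, ps⟩
      · exact absurd hs (splitQ_ne_nil rest)
      · simp [splitQ, rqBuildB, ih, hs]
    · simp only [rqLoopA, if_neg hc]
      rw [rqLoopA_append]
      rcases hs : splitQ rest with _ | ⟨p, ps⟩
      · exact absurd hs (splitQ_ne_nil rest)
      · simp [splitQ, hc, ih, hs]

-- ===== VERDICT (by name: the statement is the Claim_ definition above) =====
theorem replace_question_marks_spec : Claim_equal_replace_question_marks := by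
  intro sql placeholder _ _
  unfold Spec_replace_question_marks replace_question_marks replace_question_marks_alt
  have hbr : (PySem.Str.find placeholder "%d" ≠ -1) ↔ (PySem.Str.isIn "%d" placeholder = true) := by
    rw [PySem.Str.find_ne_neg_one_iff, PySem.Str.isIn_iff_infix]
  by_cases h : PySem.Str.isIn "%d" placeholder = true
  · rw [if_pos (hbr.mpr h), if_pos h]
    rw [splitOn_eq_splitQ]
    rcases hs : splitQ sql.toList with _ | ⟨p, ps⟩
    · exact absurd hs (splitQ_ne_nil _)
    · have := scan_eq_interleave placeholder.toList sql.toList 1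
      rw [hs] at this
      simp only [PySem.Chars.join, intercalate_nil_left]
      rw [this]
      simp
  · rw [if_neg (fun hne => h (hbr.mp hne)), if_neg h]
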